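-- pv_equiv track=rewrite | github.com/carmipa/carmipa-computational-thinking-using-python- | CP/CD-2-PYTHON/CP-2-Cdu/EX-1.py | contar_segmentos_iguais
-- ===== SOURCE A (Python) =====
-- def contar_segmentos_iguais(n, numeros):
--     if n == 0:
--         return 0
--
--     segmentos = 1
--     for i in range(1, n):
--         if numeros[i] != numeros[i-1]:
--             segmentos += 1
--
--     return segmentos
-- ===== SOURCE B (Python) =====
-- def contar_segmentos_iguais(n, numeros):
--     if n == 0:
--         return 0
--     # Run-skipping: start the first segment at numeros[0]; each pass of the
--     # outer loop skips one whole run of values equal to the current head v,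
--     # then opens the next segment at the first differing value.
--     segmentos = 1
--     v = numeros[0]
--     i = 1
--     while i < n:
--         while i < n and numeros[i] == v:
--             i += 1
--         if i < n:
--             v = numeros[i]
--             segmentos += 1
--             i += 1
--     return segmentos
-- ===== Notes on version B (the rewrite author's own statement) =====
-- stated objective: alternative
-- what changed: B counts segments by run-skipping (an outer loop once per segment and an inner loop that skips the whole run equal to the stored run head v taken from numeros[0]) instead of A's single pass that increments a counter on every adjacent predecessor mismatch.
-- outside the precondition, e.g. on contar_segmentos_iguais(1, []): A returns 1, B raises IndexError; on contar_segmentos_iguais(-1, []): A returns 1, B raises IndexError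
import Mathlib
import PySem

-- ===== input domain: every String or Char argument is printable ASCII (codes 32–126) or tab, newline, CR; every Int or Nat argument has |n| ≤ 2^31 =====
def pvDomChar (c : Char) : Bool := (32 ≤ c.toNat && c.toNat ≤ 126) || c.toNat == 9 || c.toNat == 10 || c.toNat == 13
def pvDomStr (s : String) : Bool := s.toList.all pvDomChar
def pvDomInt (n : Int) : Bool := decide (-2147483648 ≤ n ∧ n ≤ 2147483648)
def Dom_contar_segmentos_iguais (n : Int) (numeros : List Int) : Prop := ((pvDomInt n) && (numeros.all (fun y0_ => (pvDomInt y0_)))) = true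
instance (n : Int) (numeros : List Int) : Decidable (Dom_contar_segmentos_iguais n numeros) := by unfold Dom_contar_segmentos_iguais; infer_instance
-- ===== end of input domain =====

-- B counts segments by run-skipping (outer loop per segment, inner loop skips the run
-- equal to the stored head v) instead of A's per-index predecessor comparison; same
-- O(n) cost, equal wherever A returns on Pre_.

-- ===== PORT A =====
-- numeros[i] raises IndexError out of range; Pre_ keeps every index A accesses in
-- range, so the 0-default of pyGetD is never taken on admitted inputs.
def contar_segmentos_iguais (n : Int) (numeros : List Int) : Int :=
  if n = 0 then 0
  else
    (PySem.List.pyRange 1 n 1).foldl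
      (fun segmentos i =>
        if PySem.List.pyGetD numeros i 0 ≠ PySem.List.pyGetD numeros (i - 1) 0
        then segmentos + 1 else segmentos) 1

-- ===== PORT B =====
-- inner 'while i < n and numeros[i] == v: i += 1' of Source B (returns the new i);
-- the Nat fuel only makes the loop total: it starts at (n - i).toNat, an upper
-- bound on the remaining iterations, so it never runs out before the guard fails
def pvSkipRun (n : Int) (numeros : List Int) (v : Int) : Nat → Int → Int
  | 0, i => i
  | fuel + 1, i =>
    if i < n ∧ PySem.List.pyGetD numeros i 0 = v then pvSkipRun n numeros v fuel (i + 1)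
    else i

-- outer 'while i < n: …' of Source B, same fuel convention (state: segmentos, v, i)
def pvAltGo (n : Int) (numeros : List Int) : Nat → Int → Int → Int → Int
  | 0, segmentos, _, _ => segmentos
  | fuel + 1, segmentos, v, i =>
    if i < n then
      let j := pvSkipRun n numeros v (n - i).toNat i
      if j < n then
        pvAltGo n numeros fuel (segmentos + 1) (PySem.List.pyGetD numeros j 0) (j + 1)
      else pvAltGo n numeros fuel segmentos v j
    else segmentos

def contar_segmentos_iguais_alt (n : Int) (numeros : List Int) : Int :=
  if n = 0 then 0
  else pvAltGo n numeros n.toNat 1 (PySem.List.pyGetD numeros 0 0) 1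

-- ===== PRECONDITION & SPEC =====
-- Pre_ excludes the inputs on which either program indexes past the end: A raises
-- IndexError when 2 ≤ n > len(numeros); B reads numeros[0] and so raises IndexError
-- on the empty list whenever n ≠ 0 (there A returns its initial counter 1 without
-- ever indexing — n = 1 or n < 0 — or raises too).
def Pre_contar_segmentos_iguais (n : Int) (numeros : List Int) : Prop :=
  n = 0 ∨ (1 ≤ numeros.length ∧ (n ≤ 0 ∨ n ≤ (numeros.length : Int)))
instance (n : Int) (numeros : List Int) : Decidable (Pre_contar_segmentos_iguais n numeros) := by unfold Pre_contar_segmentos_iguais; infer_instance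

def pvWitness_contar_segmentos_iguais : Int × List Int := (3, [1, 1, 2])

def Spec_contar_segmentos_iguais (n : Int) (numeros : List Int) (out : Int) : Prop := out = contar_segmentos_iguais_alt n numeros
instance (n : Int) (numeros : List Int) (out : Int) : Decidable (Spec_contar_segmentos_iguais n numeros out) := by unfold Spec_contar_segmentos_iguais; infer_instance

-- ===== CLAIM (what is proved, stated in full; the proofs are below) =====
def Claim_equal_contar_segmentos_iguais : Prop := ∀ (n : Int) (numeros : List Int), Dom_contar_segmentos_iguais n numeros → Pre_contar_segmentos_iguais n numeros → Spec_contar_segmentos_iguais n numeros (contar_segmentos_iguais n numeros)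

-- ===== LEMMAS AND PROOFS =====

-- boundary count on indices [a, n)
def pvCnt (n : Int) (xs : List Int) (a : Int) : Nat :=
  (PySem.List.pyRange a n 1).countP
    (fun k => decide (PySem.List.pyGetD xs k 0 ≠ PySem.List.pyGetD xs (k - 1) 0))

theorem pvFoldlCount (P : Int → Prop) [DecidablePred P] (l : List Int) (init : Int) :
    l.foldl (fun s i => if P i then s + 1 else s) init
      = init + (l.countP (fun i => decide (P i)) : Int) := by
  induction l generalizing init with
  | nil => simp
  | cons x t ih => by_cases hP : P x <;> simp [List.foldl_cons, ih, hP] <;> ring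

theorem pvSkipRun_ge (n : Int) (xs : List Int) (v : Int) :
    ∀ (fuel : Nat) (i : Int), i ≤ pvSkipRun n xs v fuel i := by
  intro fuel
  induction fuel with
  | zero => intro i; simp [pvSkipRun]
  | succ fuel ih =>
    intro i
    simp only [pvSkipRun]
    split
    · have := ih (i + 1); omega
    · omega

theorem pvSkipRun_spec (n : Int) (xs : List Int) (v : Int) :
    ∀ (fuel : Nat) (i : Int), i ≤ n → (n - i).toNat ≤ fuel →
      pvSkipRun n xs v fuel i ≤ n ∧
      (∀ k, i ≤ k → k < pvSkipRun n xs v fuel i → PySem.List.pyGetD xs k 0 = v) ∧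
      (pvSkipRun n xs v fuel i < n → PySem.List.pyGetD xs (pvSkipRun n xs v fuel i) 0 ≠ v) := by
  intro fuel
  induction fuel with
  | zero =>
    intro i hin hf
    simp only [pvSkipRun]
    refine ⟨hin, by omega, by omega⟩
  | succ fuel ih =>
    intro i hin hf
    simp only [pvSkipRun]
    split
    · rename_i hcond
      obtain ⟨h1, h2, h3⟩ := ih (i + 1) (by omega) (by omega)
      refine ⟨h1, ?_, h3⟩
      intro k hk1 hk2
      by_cases hk : k = i
      · subst hk; exact hcond.2
      · exact h2 k (by omega) hk2
    · rename_i hcond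
      refine ⟨hin, by omega, ?_⟩
      intro hlt heq
      exact hcond ⟨hlt, heq⟩

-- loop invariant: v is the value at index i - 1; the loop adds one boundary per run start
theorem pvAltGo_eq (n : Int) (xs : List Int) :
    ∀ (fuel : Nat) (segs v i : Int), 1 ≤ i → i ≤ n → (n - i).toNat ≤ fuel →
      v = PySem.List.pyGetD xs (i - 1) 0 →
      pvAltGo n xs fuel segs v i = segs + (pvCnt n xs i : Int) := by
  intro fuel
  induction fuel with
  | zero =>
    intro segs v i hi1 hin hf hv
    have hni : i = n := by omega
    simp [pvAltGo, pvCnt, hni, PySem.List.pyRange_one_eq_nil le_rfl]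
  | succ fuel ih =>
    intro segs v i hi1 hin hf hv
    simp only [pvAltGo]
    by_cases h : i < n
    · rw [if_pos h]
      set j := pvSkipRun n xs v (n - i).toNat i with hj
      obtain ⟨hjn, hrun, hend⟩ := pvSkipRun_spec n xs v (n - i).toNat i (by omega) le_rfl
      have hij : i ≤ j := pvSkipRun_ge n xs v (n - i).toNat i
      have hprev : PySem.List.pyGetD xs (j - 1) 0 = v := by
        by_cases hki : j - 1 < i
        · have : j = i := by omega
          rw [this, ← hv]
        · exact hrun (j - 1) (by omega) (by omega)
      have hsplit : PySem.List.pyRange i n 1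
          = PySem.List.pyRange i j 1 ++ PySem.List.pyRange j n 1 :=
        PySem.List.pyRange_one_append _ _ _ hij hjn
      have hfirst : (PySem.List.pyRange i j 1).countP
          (fun k => decide (PySem.List.pyGetD xs k 0 ≠ PySem.List.pyGetD xs (k - 1) 0)) = 0 := by
        rw [List.countP_eq_zero]
        intro k hk
        rw [PySem.List.mem_pyRange_one] at hk
        have hk1 : PySem.List.pyGetD xs k 0 = v := hrun k (by omega) (by omega)
        have hk2 : PySem.List.pyGetD xs (k - 1) 0 = v := by
          by_cases hki : k - 1 < i
          · have : k = i := by omega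
            rw [this, ← hv]
          · exact hrun (k - 1) (by omega) (by omega)
        simp [hk1, hk2]
      by_cases hjlt : j < n
      · rw [if_pos hjlt,
            ih (segs + 1) (PySem.List.pyGetD xs j 0) (j + 1) (by omega) (by omega) (by omega)
              (by rw [show j + 1 - 1 = j by ring])]
        have hbj : PySem.List.pyGetD xs j 0 ≠ PySem.List.pyGetD xs (j - 1) 0 := by
          rw [hprev]; exact hend hjlt
        unfold pvCnt
        rw [hsplit, List.countP_append, hfirst, PySem.List.pyRange_one_cons hjlt,
            List.countP_cons, if_pos (decide_eq_true hbj)]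
        push_cast
        ring
      · have hjn' : j = n := by omega
        rw [if_neg hjlt,
            ih segs v j (by omega) (by omega) (by omega) (by rw [hprev])]
        unfold pvCnt
        rw [hsplit, List.countP_append, hfirst, hjn',
            PySem.List.pyRange_one_eq_nil le_rfl]
        simp
    · rw [if_neg h]
      have hni : i = n := by omega
      simp [pvCnt, hni, PySem.List.pyRange_one_eq_nil le_rfl]

-- ===== VERDICT (by name: the statement is the Claim_ definition above) =====
theorem contar_segmentos_iguais_spec : Claim_equal_contar_segmentos_iguais := by
  intro n numeros _ hpre
  unfold Spec_contar_segmentos_iguais contar_segmentos_iguais contar_segmentos_iguais_alt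
  by_cases hn : n = 0
  · rw [if_pos hn, if_pos hn]
  · rw [if_neg hn, if_neg hn,
        pvFoldlCount (fun i => PySem.List.pyGetD numeros i 0 ≠ PySem.List.pyGetD numeros (i - 1) 0)]
    by_cases hpos : 1 ≤ n
    · rw [pvAltGo_eq n numeros n.toNat 1 (PySem.List.pyGetD numeros 0 0) 1 le_rfl hpos
            (by omega) (by norm_num)]
      rfl
    · -- n < 0: A's range is empty and B's fuel n.toNat = 0, both sides are 1
      have hz : n.toNat = 0 := by omega
      rw [PySem.List.pyRange_one_eq_nil (by omega), hz]
      simp [pvAltGo]
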